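-- pv_equiv track=rewrite | github.com/Ashutosh777777/DSA-Practice | CP/smallest_stable_index_2.py | firstStableIndex
-- ===== SOURCE A (Python) =====
-- def firstStableIndex(nums, k):
--     """
--     :type nums: List[int]
--     :type k: int
--     :rtype: int
--     """
--     n = len(nums)
--     p = [0]*n
--     s = [0]*n
--
--     p[0] = nums[0]
--     for i in range(1, n):
--         p[i] = max(p[i-1], nums[i])
--     s[-1] = nums[-1]
--     for i in range(n-2, -1, -1):
--         s[i] = min(s[i+1], nums[i])
--     for i in range(n):
--         if p[i] - s[i]<=k:
--             return i
--     return -1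
-- ===== SOURCE B (Python) =====
-- def firstStableIndex(nums, k):
--     # Monotonic stack of (start, value) breakpoints where the running prefix
--     # max strictly increases; then one backward scan keeping the suffix min
--     # as a scalar, popping stale breakpoints, and recording the smallest
--     # qualifying index (last write wins).
--     bp = []
--     for i, v in enumerate(nums):
--         if not bp or v > bp[-1][1]:
--             bp.append((i, v))
--     ans = -1
--     m = nums[-1]
--     for i in range(len(nums) - 1, -1, -1):
--         if nums[i] < m:
--             m = nums[i]
--         while bp[-1][0] > i:
--             bp.pop()
--         if bp[-1][1] - m <= k:
--             ans = i
--     return ans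
-- ===== Notes on version B (the rewrite author's own statement) =====
-- stated objective: alternative
-- what changed: A builds full prefix-max and suffix-min arrays and scans forward for the first qualifying index; B instead keeps only a monotonic stack of (index, value) breakpoints where the running prefix max increases, then does one backward scan with a scalar suffix min, popping stale breakpoints and keeping the smallest qualifying index (last write wins).
import Mathlib
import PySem

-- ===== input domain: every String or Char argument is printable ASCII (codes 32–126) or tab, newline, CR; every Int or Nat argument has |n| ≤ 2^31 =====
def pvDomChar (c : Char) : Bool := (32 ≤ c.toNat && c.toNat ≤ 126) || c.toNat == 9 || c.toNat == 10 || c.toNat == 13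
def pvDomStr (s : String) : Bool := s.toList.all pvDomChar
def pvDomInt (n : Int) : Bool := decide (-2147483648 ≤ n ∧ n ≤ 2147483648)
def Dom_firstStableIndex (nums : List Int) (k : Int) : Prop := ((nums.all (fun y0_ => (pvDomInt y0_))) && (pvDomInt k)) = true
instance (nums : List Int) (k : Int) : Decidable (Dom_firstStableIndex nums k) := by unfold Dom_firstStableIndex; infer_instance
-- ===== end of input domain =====

-- B replaces A's two full auxiliary arrays and three passes by a monotonic stack of
-- prefix-max breakpoints plus one backward scan (scalar suffix min, last-write-wins
-- answer); same O(n) cost, a different algorithm (objective: alternative).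

-- ===== PORT A =====
-- p[i] = max(p[i-1], nums[i]) loop: builds the prefix-max tail given accumulator p[i-1]
def pvPrefA (acc : Int) : List Int → List Int
  | [] => []
  | v :: vs => max acc v :: pvPrefA (max acc v) vs

-- s[i] = min(s[i+1], nums[i]) backward loop, s[-1] = nums[-1]
def pvSufA : List Int → List Int
  | [] => []
  | x :: xs =>
    match pvSufA xs with
    | [] => [x]
    | y :: ys => min x y :: y :: ys

-- final loop: first i with p[i] - s[i] <= k, else -1
def pvScanA (k i : Int) : List Int → List Int → Int
  | pv :: ps, sv :: ss => if pv - sv ≤ k then i else pvScanA k (i + 1) ps ss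
  | _, _ => -1

def firstStableIndex (nums : List Int) (k : Int) : Int :=
  match nums with
  | [] => -1   -- Python raises IndexError here (nums[0]); excluded by Pre_
  | x :: xs => pvScanA k 0 (x :: pvPrefA x xs) (pvSufA (x :: xs))

-- ===== PORT B =====
-- forward `for i, v in enumerate(nums)` building the breakpoint stack bp
-- (bp[-1] = stack top = list HEAD here; push when v > top value)
def pvBuildBP : List (Int × Int) → List (Int × Int) → List (Int × Int)
  | [], bp => bp
  | (i, v) :: rest, bp =>
      pvBuildBP rest
        (match bp with
         | [] => [(i, v)]
         | (j, w) :: bps => if v > w then (i, v) :: (j, w) :: bps else (j, w) :: bps)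

-- `while bp[-1][0] > i: bp.pop()`
def pvPop (i : Int) : List (Int × Int) → List (Int × Int)
  | [] => []
  | (j, w) :: bps => if j > i then pvPop i bps else (j, w) :: bps

-- backward `for i in range(len(nums)-1, -1, -1)` over nums[i]: ported as a fold over
-- the reversed (index, value) pairs — exact: it visits the same (i, nums[i]) pairs
def pvLoopB (k : Int) : List (Int × Int) → Int → List (Int × Int) → Int → Int
  | [], _, _, ans => ans
  | (i, v) :: rest, m, bp, ans =>
      let m' := if v < m then v else m
      let bp' := pvPop i bp
      let ans' :=
        match bp' with
        | (_, w) :: _ => if w - m' ≤ k then i else ans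
        | [] => ans
      pvLoopB k rest m' bp' ans'

def firstStableIndex_alt (nums : List Int) (k : Int) : Int :=
  match nums.getLast? with
  | none => -1   -- Python raises IndexError here (nums[-1]); excluded by Pre_
  | some last =>
      pvLoopB k (PySem.List.enumerate nums 0).reverse last
        (pvBuildBP (PySem.List.enumerate nums 0) []) (-1)

-- ===== PRECONDITION & SPEC =====
-- Python A raises IndexError on the empty list (nums[0]); excluded.
def Pre_firstStableIndex (nums : List Int) (k : Int) : Prop := nums ≠ []
instance (nums : List Int) (k : Int) : Decidable (Pre_firstStableIndex nums k) := by unfold Pre_firstStableIndex; infer_instance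
def pvWitness_firstStableIndex : List Int × Int := ([3, 1, 2], 1)

def Spec_firstStableIndex (nums : List Int) (k : Int) (out : Int) : Prop := out = firstStableIndex_alt nums k
instance (nums : List Int) (k : Int) (out : Int) : Decidable (Spec_firstStableIndex nums k out) := by unfold Spec_firstStableIndex; infer_instance

-- ===== CLAIM (what is proved, stated in full; the proofs are below) =====
def Claim_equal_firstStableIndex : Prop := ∀ (nums : List Int) (k : Int), Dom_firstStableIndex nums k → Pre_firstStableIndex nums k → Spec_firstStableIndex nums k (firstStableIndex nums k)

-- ===== LEMMAS AND PROOFS =====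

-- reference: position of the first index with p[i] - s[i] ≤ k
def pvFA (k : Int) : List Int → List Int → Option Nat
  | p :: ps, s :: ss => if p - s ≤ k then some 0 else (pvFA k ps ss).map (· + 1)
  | _, _ => none

-- prefix-max list, suffix-min list, and pointwise accessors
def pvPS (nums : List Int) : List Int :=
  match nums with | [] => [] | x :: xs => x :: pvPrefA x xs
def pvP (nums : List Int) (i : Nat) : Int := (pvPS nums).getD i 0
def pvS (nums : List Int) (i : Nat) : Int := (pvSufA nums).getD i 0
def pvV (nums : List Int) (i : Nat) : Int := nums.getD i 0

-- oracle invariant: popping the stack to index i exposes the prefix max at i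
def pvOr (nums : List Int) (t : Nat) (bp : List (Int × Int)) : Prop :=
  ∀ i : Nat, i ≤ t → ∃ j w bps, pvPop (↑i) bp = (j, w) :: bps ∧ w = pvP nums i

theorem pvLenPref (a : Int) (xs : List Int) : (pvPrefA a xs).length = xs.length := by
  induction xs generalizing a with
  | nil => rfl
  | cons v vs ih => simp [pvPrefA, ih]

theorem pvLenSuf (xs : List Int) : (pvSufA xs).length = xs.length := by
  induction xs with
  | nil => rfl
  | cons x xs ih =>
    simp only [pvSufA]
    cases h : pvSufA xs with
    | nil => rw [h] at ih; simp at ih; simp [ih]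
    | cons y ys => rw [h] at ih; simp at ih ⊢; omega

theorem pvP_zero (x : Int) (xs : List Int) : pvP (x :: xs) 0 = x := by
  simp [pvP, pvPS]

theorem pvPrefA_getD (xs : List Int) : ∀ (a : Int) (i : Nat), i < xs.length →
    (pvPrefA a xs).getD i 0 = max ((a :: pvPrefA a xs).getD i 0) (xs.getD i 0) := by
  induction xs with
  | nil => intro a i h; simp at h
  | cons v vs ih =>
    intro a i h
    cases i with
    | zero => simp [pvPrefA]
    | succ i =>
      simp only [pvPrefA, List.getD_cons_succ]
      exact ih (max a v) i (by simpa using h)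

theorem pvP_succ (nums : List Int) (t : Nat) (h : t + 1 < nums.length) :
    pvP nums (t + 1) = max (pvP nums t) (pvV nums (t + 1)) := by
  cases nums with
  | nil => simp at h
  | cons x xs =>
    simp only [pvP, pvPS, pvV, List.getD_cons_succ]
    exact pvPrefA_getD xs x t (by simpa using h)

theorem pvS_last (nums : List Int) (h : nums ≠ []) :
    pvS nums (nums.length - 1) = pvV nums (nums.length - 1) := by
  induction nums with
  | nil => simp at h
  | cons x xs ih =>
    cases xs with
    | nil => simp [pvS, pvSufA, pvV]
    | cons y ys =>
      have hih := ih (by simp)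
      cases hh : pvSufA (y :: ys) with
      | nil => have := pvLenSuf (y :: ys); rw [hh] at this; simp at this
      | cons z zs =>
        have hstep : pvSufA (x :: y :: ys) = min x z :: z :: zs := by
          show (match pvSufA (y :: ys) with
                | [] => [x] | w :: ws => min x w :: w :: ws) = _
          rw [hh]
        simp only [pvS, pvV, hh] at hih
        simp only [pvS, pvV, hstep, List.length_cons]
        have h1 : ys.length + 1 + 1 - 1 = ys.length + 1 := by omega
        rw [h1]
        simpa using hih

theorem pvS_rec (nums : List Int) (i : Nat) (h : i + 1 < nums.length) :
    pvS nums i = min (pvV nums i) (pvS nums (i + 1)) := by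
  induction nums generalizing i with
  | nil => simp at h
  | cons x xs ih =>
    cases xs with
    | nil => simp at h
    | cons y ys =>
      cases hh : pvSufA (y :: ys) with
      | nil => have := pvLenSuf (y :: ys); rw [hh] at this; simp at this
      | cons z zs =>
        have hstep : pvSufA (x :: y :: ys) = min x z :: z :: zs := by
          show (match pvSufA (y :: ys) with
                | [] => [x] | w :: ws => min x w :: w :: ws) = _
          rw [hh]
        simp only [pvS, pvV, hstep]
        cases i with
        | zero => simp
        | succ i =>
          have hih := ih (i := i) (by simp at h ⊢; omega)
          simp only [pvS, pvV, hh] at hih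
          simpa using hih

theorem pvPop_pairwise (bp : List (Int × Int)) (i : Int)
    (h : List.Pairwise (fun a b => b.1 < a.1) bp) :
    List.Pairwise (fun a b => b.1 < a.1) (pvPop i bp) := by
  induction bp with
  | nil => simp [pvPop]
  | cons e bps ih =>
    obtain ⟨j, w⟩ := e
    rw [List.pairwise_cons] at h
    simp only [pvPop]
    split_ifs with hj
    · exact ih h.2
    · exact List.pairwise_cons.mpr h

theorem pvPop_pop (bp : List (Int × Int)) (i t : Int)
    (hs : List.Pairwise (fun a b => b.1 < a.1) bp) (hit : i ≤ t) :
    pvPop i (pvPop t bp) = pvPop i bp := by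
  induction bp with
  | nil => rfl
  | cons e bps ih =>
    obtain ⟨j, w⟩ := e
    rw [List.pairwise_cons] at hs
    by_cases hj : j > t
    · have hji : j > i := by omega
      have h2 : pvPop t ((j, w) :: bps) = pvPop t bps := by simp [pvPop, hj]
      have h3 : pvPop i ((j, w) :: bps) = pvPop i bps := by simp [pvPop, hji]
      rw [h2, h3]; exact ih hs.2
    · have h1 : pvPop t ((j, w) :: bps) = (j, w) :: bps := by simp [pvPop, hj]
      rw [h1]

theorem pvScanA_char (k : Int) (ps ss : List Int) : ∀ c : Int,
    pvScanA k c ps ss = (match pvFA k ps ss with | some j => c + (j : Int) | none => -1) := by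
  induction ps generalizing ss with
  | nil => intro c; cases ss <;> simp [pvScanA, pvFA]
  | cons p ps ih =>
    intro c
    cases ss with
    | nil => simp [pvScanA, pvFA]
    | cons s ss =>
      simp only [pvScanA, pvFA]
      split_ifs with hc
      · simp
      · rw [ih ss (c + 1)]
        cases pvFA k ps ss with
        | none => simp
        | some j => simp; ring

theorem pvFA_snoc (k : Int) (ps ss : List Int) (p s : Int) (h : ps.length = ss.length) :
    pvFA k (ps ++ [p]) (ss ++ [s]) =
      (match pvFA k ps ss with
       | some j => some j
       | none => if p - s ≤ k then some ps.length else none) := by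
  induction ps generalizing ss with
  | nil =>
    cases ss with
    | nil => simp only [List.nil_append, pvFA]; split_ifs <;> simp
    | cons s' ss => simp at h
  | cons p' ps ih =>
    cases ss with
    | nil => simp at h
    | cons s' ss =>
      simp only [List.cons_append, pvFA]
      by_cases hc : p' - s' ≤ k
      · simp [hc]
      · simp only [if_neg hc]
        rw [ih ss (by simpa using h)]
        cases hfa : pvFA k ps ss with
        | some j => simp
        | none =>
          by_cases hc2 : p - s ≤ k
          · simp [hc2]
          · simp [hc2]

theorem pvBuild_main (nums : List Int) : ∀ (rest : List (Int × Int)) (t : Nat) (bp : List (Int × Int)),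
    rest = PySem.List.enumerate (nums.drop (t + 1)) (↑(t + 1)) →
    t + 1 ≤ nums.length →
    List.Pairwise (fun a b => b.1 < a.1) bp →
    (∀ e ∈ bp, e.1 ≤ (t : Int)) →
    pvOr nums t bp →
    List.Pairwise (fun a b => b.1 < a.1) (pvBuildBP rest bp) ∧
      pvOr nums (nums.length - 1) (pvBuildBP rest bp) := by
  intro rest
  induction rest with
  | nil =>
    intro t bp hrest hle hpw hst hor
    have h0 := congrArg List.length hrest
    simp [PySem.List.length_enumerate] at h0
    have ht : nums.length - 1 = t := by omega
    rw [show pvBuildBP [] bp = bp from rfl, ht]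
    exact ⟨hpw, hor⟩
  | cons iv rest' ih =>
    intro t bp hrest hle hpw hst hor
    obtain ⟨i, v⟩ := iv
    have hlt : t + 1 < nums.length := by
      by_contra hge
      rw [List.drop_eq_nil_of_le (by omega)] at hrest
      simp [PySem.List.enumerate] at hrest
    rw [List.drop_eq_getElem_cons hlt, PySem.List.enumerate_cons] at hrest
    rw [List.cons_eq_cons, Prod.mk.injEq] at hrest
    obtain ⟨⟨hi, hv⟩, hrest'⟩ := hrest
    obtain ⟨j0, w0, bp0, hpop0, hw0⟩ := hor t le_rfl
    cases bp with
    | nil => simp [pvPop] at hpop0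
    | cons e bp1 =>
      obtain ⟨j, w⟩ := e
      have hjle : j ≤ (t : Int) := hst (j, w) (by simp)
      have hpope : pvPop (↑t) ((j, w) :: bp1) = (j, w) :: bp1 := by
        simp only [pvPop, if_neg (by omega : ¬ j > (t : Int))]
      rw [hpope, List.cons_eq_cons, Prod.mk.injEq] at hpop0
      obtain ⟨⟨hj0, hw⟩, hbp0⟩ := hpop0
      have hwP : w = pvP nums t := by rw [hw, hw0]
      have hvV : v = pvV nums (t + 1) := by
        rw [hv, pvV, List.getD_eq_getElem nums 0 hlt]
      have hstep : pvBuildBP ((i, v) :: rest') ((j, w) :: bp1)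
          = pvBuildBP rest' (if v > w then (i, v) :: (j, w) :: bp1 else (j, w) :: bp1) := rfl
      rw [hstep]
      have hPsucc := pvP_succ nums t hlt
      have hrest'' : rest' = PySem.List.enumerate (nums.drop (t + 1 + 1)) (↑(t + 1 + 1)) := by
        rw [hrest']; norm_num
      have hpw2 : List.Pairwise (fun a b => b.1 < a.1)
          (if v > w then (i, v) :: (j, w) :: bp1 else (j, w) :: bp1) := by
        split_ifs with hvw
        · refine List.pairwise_cons.mpr ⟨?_, hpw⟩
          intro e he
          have := hst e he
          simp [hi]; omega
        · exact hpw
      have hst2 : ∀ e ∈ (if v > w then (i, v) :: (j, w) :: bp1 else (j, w) :: bp1),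
          e.1 ≤ ((t + 1 : Nat) : Int) := by
        split_ifs with hvw
        · intro e he
          rcases List.mem_cons.mp he with h1 | h2
          · subst h1; simp [hi]
          · have := hst e h2; push_cast; omega
        · intro e he; have := hst e he; push_cast; omega
      have hor2 : pvOr nums (t + 1) (if v > w then (i, v) :: (j, w) :: bp1 else (j, w) :: bp1) := by
        intro i' hi'
        rcases Nat.lt_succ_iff_lt_or_eq.mp (Nat.lt_succ_of_le hi') with hlt' | heq
        · have hred : pvPop (↑i') (if v > w then (i, v) :: (j, w) :: bp1 else (j, w) :: bp1)
              = pvPop (↑i') ((j, w) :: bp1) := by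
            split_ifs with hvw
            · simp only [pvPop, if_pos (by rw [hi]; push_cast; omega : i > (i' : Int))]
            · rfl
          rw [hred]
          exact hor i' (by omega)
        · subst heq
          split_ifs with hvw
          · refine ⟨i, v, (j, w) :: bp1, ?_, ?_⟩
            · simp only [pvPop, if_neg (by rw [hi]; omega : ¬ i > ((t + 1 : Nat) : Int))]
            · rw [hPsucc, ← hwP, ← hvV]; omega
          · refine ⟨j, w, bp1, ?_, ?_⟩
            · simp only [pvPop, if_neg (by push_cast; omega : ¬ j > ((t + 1 : Nat) : Int))]
            · rw [hPsucc, ← hwP, ← hvV]; omega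
      obtain ⟨c1, c2⟩ := ih (t + 1) _ hrest'' (by omega) hpw2 hst2 hor2
      exact ⟨c1, c2⟩

theorem pvPS_length (nums : List Int) : (pvPS nums).length = nums.length := by
  cases nums with
  | nil => rfl
  | cons x xs => simp [pvPS, pvLenPref]

theorem pvLoop_main (nums : List Int) (k : Int) : ∀ (t : Nat), t < nums.length →
    ∀ (m : Int) (bp : List (Int × Int)) (ans : Int),
    min (pvV nums t) m = pvS nums t →
    List.Pairwise (fun a b => b.1 < a.1) bp →
    pvOr nums t bp →
    pvLoopB k (PySem.List.enumerate (nums.take (t + 1)) 0).reverse m bp ans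
      = (match pvFA k ((pvPS nums).take (t + 1)) ((pvSufA nums).take (t + 1)) with
         | some j => (j : Int) | none => ans) := by
  intro t
  induction t with
  | zero =>
    intro h0 m bp ans hm hpw hor
    cases nums with
    | nil => simp at h0
    | cons x xs =>
      obtain ⟨j, w, bps, hpop, hwP⟩ := hor 0 le_rfl
      rw [show ((0 : Nat) : Int) = 0 from rfl] at hpop
      obtain ⟨s0, ss0, hss⟩ : ∃ s0 ss0, pvSufA (x :: xs) = s0 :: ss0 := by
        cases hh : pvSufA (x :: xs) with
        | nil => have := pvLenSuf (x :: xs); rw [hh] at this; simp at this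
        | cons a l => exact ⟨a, l, rfl⟩
      have hs0 : pvS (x :: xs) 0 = s0 := by simp [pvS, hss]
      have hm' : (if x < m then x else m) = pvS (x :: xs) 0 := by
        rw [← hm]; simp only [pvV, List.getD_cons_zero, min_def]
        split_ifs <;> omega
      rw [show (x :: xs).take (0 + 1) = [x] from by simp]
      rw [show (pvPS (x :: xs)).take (0 + 1) = [x] from by simp [pvPS]]
      rw [show (pvSufA (x :: xs)).take (0 + 1) = [s0] from by simp [hss]]
      simp only [PySem.List.enumerate_cons, PySem.List.enumerate_nil, List.reverse_cons,
        List.reverse_nil, List.nil_append, pvLoopB, hpop, hm']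
      simp only [pvFA]
      rw [hwP, pvP_zero, hs0]
      split_ifs with hc
      · simp
      · rfl
  | succ t ih =>
    intro h1 m bp ans hm hpw hor
    have hvV : nums[t + 1] = pvV nums (t + 1) := (List.getD_eq_getElem nums 0 h1).symm
    have htake2 : nums.take (t + 1 + 1) = nums.take (t + 1) ++ [nums[t + 1]] := by
      rw [List.take_add_one, List.getElem?_eq_getElem h1]; rfl
    have hlen_t : ((nums.take (t + 1)).length : Int) = ((t + 1 : Nat) : Int) := by
      simp; omega
    rw [htake2, PySem.List.enumerate_append, List.reverse_append, hlen_t,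
      PySem.List.enumerate_cons, PySem.List.enumerate_nil]
    obtain ⟨j, w, bps, hpop, hwP⟩ := hor (t + 1) le_rfl
    have hm' : (if nums[t + 1] < m then nums[t + 1] else m) = pvS nums (t + 1) := by
      rw [← hm, hvV]; simp only [min_def]; split_ifs <;> omega
    simp only [List.reverse_cons, List.reverse_nil, List.nil_append, List.cons_append,
      zero_add, pvLoopB, hpop, hm']
    have hpw2 : List.Pairwise (fun a b => b.1 < a.1) ((j, w) :: bps) := by
      rw [← hpop]; exact pvPop_pairwise bp _ hpw
    have hor2 : pvOr nums t ((j, w) :: bps) := by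
      intro i' hi'
      rw [← hpop, pvPop_pop bp (↑i') (↑(t + 1)) hpw (by push_cast; omega)]
      exact hor i' (by omega)
    rw [ih (by omega) _ _ _ ((pvS_rec nums t h1).symm) hpw2 hor2]
    have hpsl : t + 1 < (pvPS nums).length := by rw [pvPS_length]; omega
    have hssl : t + 1 < (pvSufA nums).length := by rw [pvLenSuf]; omega
    have hps2 : (pvPS nums).take (t + 1 + 1) = (pvPS nums).take (t + 1) ++ [pvP nums (t + 1)] := by
      rw [List.take_add_one, List.getElem?_eq_getElem hpsl]
      rw [pvP, List.getD_eq_getElem _ _ hpsl]; rfl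
    have hss2 : (pvSufA nums).take (t + 1 + 1) = (pvSufA nums).take (t + 1) ++ [pvS nums (t + 1)] := by
      rw [List.take_add_one, List.getElem?_eq_getElem hssl]
      rw [pvS, List.getD_eq_getElem _ _ hssl]; rfl
    rw [hps2, hss2, pvFA_snoc k _ _ _ _ (by simp [pvPS_length, pvLenSuf])]
    have hlen' : ((pvPS nums).take (t + 1)).length = t + 1 := by
      simp [pvPS_length]; omega
    rw [hlen']
    cases pvFA k ((pvPS nums).take (t + 1)) ((pvSufA nums).take (t + 1)) with
    | some j' => rfl
    | none =>
      rw [hwP]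
      split_ifs with hc
      · rfl
      · rfl

-- ===== VERDICT (by name: the statement is the Claim_ definition above) =====
theorem firstStableIndex_spec : Claim_equal_firstStableIndex := by
  intro nums k hdom hpre
  unfold Spec_firstStableIndex
  cases nums with
  | nil => exact absurd rfl hpre
  | cons x xs =>
    have hA : firstStableIndex (x :: xs) k
        = (match pvFA k (pvPS (x :: xs)) (pvSufA (x :: xs)) with
           | some j => (j : Int) | none => -1) := by
      show pvScanA k 0 (x :: pvPrefA x xs) (pvSufA (x :: xs)) = _
      rw [show (x :: pvPrefA x xs) = pvPS (x :: xs) from rfl]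
      rw [pvScanA_char k (pvPS (x :: xs)) (pvSufA (x :: xs)) 0]
      cases pvFA k (pvPS (x :: xs)) (pvSufA (x :: xs)) with
      | some j => simp
      | none => rfl
    have hidx : (x :: xs).length - 1 = xs.length := by simp
    have hbuild := pvBuild_main (x :: xs) (PySem.List.enumerate xs 1) 0 [(0, x)]
      (by norm_num)
      (by simp)
      (List.pairwise_singleton _ _)
      (by intro e he; simp at he; simp [he])
      (by
        intro i hi
        have hi0 : i = 0 := Nat.le_zero.mp hi
        subst hi0
        exact ⟨0, x, [], by simp [pvPop], (pvP_zero x xs).symm⟩)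
    obtain ⟨hbpw, hbor⟩ := hbuild
    rw [hidx] at hbor
    have hbstep : pvBuildBP (PySem.List.enumerate (x :: xs) 0) []
        = pvBuildBP (PySem.List.enumerate xs 1) [(0, x)] := by
      rw [PySem.List.enumerate_cons]
      norm_num
      rfl
    have hlast : (x :: xs).getLast? = some (pvV (x :: xs) xs.length) := by
      rw [List.getLast?_eq_getElem?]
      rw [List.getElem?_eq_getElem (by simp : (x :: xs).length - 1 < (x :: xs).length)]
      rw [pvV, List.getD_eq_getElem _ _ (by simp : xs.length < (x :: xs).length)]
      rfl
    have hm : min (pvV (x :: xs) xs.length) (pvV (x :: xs) xs.length)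
        = pvS (x :: xs) xs.length := by
      rw [min_self]
      have := pvS_last (x :: xs) (by simp)
      rw [hidx] at this
      exact this.symm
    have hloop := pvLoop_main (x :: xs) k xs.length (by simp)
      (pvV (x :: xs) xs.length) (pvBuildBP (PySem.List.enumerate xs 1) [(0, x)]) (-1)
      hm hbpw hbor
    rw [List.take_of_length_le (by simp : (x :: xs).length ≤ xs.length + 1)] at hloop
    rw [List.take_of_length_le (le_of_eq (by rw [pvPS_length]; simp))] at hloop
    rw [List.take_of_length_le (le_of_eq (by rw [pvLenSuf]; simp))] at hloop
    have hB : firstStableIndex_alt (x :: xs) k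
        = (match pvFA k (pvPS (x :: xs)) (pvSufA (x :: xs)) with
           | some j => (j : Int) | none => -1) := by
      unfold firstStableIndex_alt
      rw [hlast, hbstep]
      exact hloop
    rw [hA, hB]
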